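-- pv_equiv track=rewrite | github.com/hyukudan/ia-mapper | skills/mapper/scripts/skeletonize.py | render_lines
-- ===== SOURCE A (Python) =====
-- from typing import Optional
--
-- def render_lines(lines: list[str], keep: Optional[list[bool]], line_numbers: bool) -> list[str]:
--     if keep is None:
--         return [format_line(i, line, line_numbers) for i, line in enumerate(lines)]
--
--     rendered = []
--     last_kept = False
--     for idx, line in enumerate(lines):
--         if keep[idx]:
--             rendered.append(format_line(idx, line, line_numbers))
--             last_kept = True
--         else:
--             if last_kept:
--                 rendered.append("...")
--             last_kept = False
--     if rendered and rendered[-1] == "...":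
--         rendered.pop()
--     return rendered
--
-- def format_line(index: int, line: str, line_numbers: bool) -> str:
--     if not line_numbers:
--         return line
--     return f"{index + 1:>5} | {line}"
-- ===== SOURCE B (Python) =====
-- from typing import Optional
--
--
-- def format_line(index: int, line: str, line_numbers: bool) -> str:
--     if not line_numbers:
--         return line
--     return f"{index + 1:>5} | {line}"
--
--
-- def render_lines(lines: list[str], keep: Optional[list[bool]], line_numbers: bool) -> list[str]:
--     if keep is None:
--         return [format_line(i, line, line_numbers) for i, line in enumerate(lines)]
--
--     # build the kept indices first, then render by looking at gaps between them
--     idx_list = [i for i in range(len(lines)) if keep[i]]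
--     out: list[str] = []
--     prev = None
--     for j in idx_list:
--         if prev is not None and j > prev + 1:
--             out.append("...")
--         out.append(format_line(j, lines[j], line_numbers))
--         prev = j
--     return out
-- ===== Notes on version B (the rewrite author's own statement) =====
-- stated objective: simpler
-- what changed: B first builds the list of kept indices and then renders it by emitting '...' exactly at gaps between consecutive kept indices, removing A's last_kept state machine and its trailing-'...' pop fixup.
-- intended difference: When keep is given, line_numbers is false, and the last line is kept and its text is literally '...', A's trailing-pop fixup mistakes that genuine line for an ellipsis marker and drops it; B keeps it, which is the intended rendering. — e.g. on render_lines(["..."], some [true], false): A returns [], B returns ["..."]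
import Mathlib
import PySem

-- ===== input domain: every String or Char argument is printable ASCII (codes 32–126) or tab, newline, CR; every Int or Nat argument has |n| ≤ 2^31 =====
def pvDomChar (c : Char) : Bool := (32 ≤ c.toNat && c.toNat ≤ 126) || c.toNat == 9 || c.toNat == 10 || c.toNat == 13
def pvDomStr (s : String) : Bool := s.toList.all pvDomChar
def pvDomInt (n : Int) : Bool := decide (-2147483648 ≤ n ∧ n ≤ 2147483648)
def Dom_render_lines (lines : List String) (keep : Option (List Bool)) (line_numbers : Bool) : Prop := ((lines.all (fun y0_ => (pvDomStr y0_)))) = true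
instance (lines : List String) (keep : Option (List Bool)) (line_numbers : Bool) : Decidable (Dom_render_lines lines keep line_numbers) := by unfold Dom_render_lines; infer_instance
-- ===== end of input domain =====

-- B replaces A's last_kept state machine and trailing-'...' pop by building the kept-index
-- list first and emitting '...' exactly at gaps between consecutive kept indices (objective: simpler).

-- ===== PORT A =====
-- format_line(index, line, line_numbers)
def formatLine (index : Int) (line : String) (line_numbers : Bool) : String :=
  if !line_numbers then line
  else
    -- f"{index + 1:>5} | {line}": decimal of index+1 right-aligned to width 5, then " | ", then line
    let s := PySem.Int.toStr (index + 1)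
    String.ofList (List.replicate (5 - s.toList.length) ' ' ++ s.toList ++ [' ', '|', ' '] ++ line.toList)

-- the keep-is-None comprehension (identical in both Pythons): enumerate with a counter
def renderAllLoop (line_numbers : Bool) : List String → Int → List String
  | [], _ => []
  | line :: rest, i => formatLine i line line_numbers :: renderAllLoop line_numbers rest (i + 1)

-- A's loop: 'for idx, line in enumerate(lines)' carrying (rendered, last_kept)
def renderLoopA (ks : List Bool) (line_numbers : Bool) : List String → Int → List String → Bool → List String
  | [], _, rendered, _ => rendered
  | line :: rest, idx, rendered, lastKept =>
    if (PySem.List.pyGet? ks idx).getD false then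
      renderLoopA ks line_numbers rest (idx + 1) (rendered ++ [formatLine idx line line_numbers]) true
    else
      renderLoopA ks line_numbers rest (idx + 1) (if lastKept then rendered ++ ["..."] else rendered) false

def render_lines (lines : List String) (keep : Option (List Bool)) (line_numbers : Bool) : List String :=
  match keep with
  | none => renderAllLoop line_numbers lines 0
  | some ks =>
    let rendered := renderLoopA ks line_numbers lines 0 [] false
    if rendered ≠ [] ∧ rendered.getLast? = some "..." then rendered.dropLast else rendered

-- ===== PORT B =====
-- B's render loop over the kept indices, carrying (out, prev)
def renderLoopB (lines : List String) (line_numbers : Bool) : List Int → List String → Option Int → List String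
  | [], out, _ => out
  | j :: rest, out, prev =>
    let out1 := match prev with
      | none => out
      | some p => if p + 1 < j then out ++ ["..."] else out
    renderLoopB lines line_numbers rest
      (out1 ++ [formatLine j ((PySem.List.pyGet? lines j).getD "") line_numbers]) (some j)

def render_lines_alt (lines : List String) (keep : Option (List Bool)) (line_numbers : Bool) : List String :=
  match keep with
  | none => renderAllLoop line_numbers lines 0
  | some ks =>
    -- idx_list = [i for i in range(len(lines)) if keep[i]]
    let idxList := (PySem.List.pyRange 0 lines.length 1).filter
      (fun i => (PySem.List.pyGet? ks i).getD false)
    renderLoopB lines line_numbers idxList [] none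

-- ===== PRECONDITION & SPEC =====
-- Pre_ excludes keep being a shorter list than lines, on which A raises IndexError at keep[idx].
def Pre_render_lines (lines : List String) (keep : Option (List Bool)) (line_numbers : Bool) : Prop :=
  lines.length ≤ (keep.map List.length).getD lines.length
instance (lines : List String) (keep : Option (List Bool)) (line_numbers : Bool) : Decidable (Pre_render_lines lines keep line_numbers) := by unfold Pre_render_lines; infer_instance
def pvWitness_render_lines : List String × Option (List Bool) × Bool := (["a", "b"], some [true, false], true)

-- When keep is given, line_numbers is false, and the last line is kept and its text is literally
-- "...", A's trailing-pop fixup mistakes that genuine line for an ellipsis marker and drops it;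
-- B keeps it, which is the intended rendering.
def D_render_lines (lines : List String) (keep : Option (List Bool)) (line_numbers : Bool) : Prop :=
  keep ≠ none ∧ line_numbers = false ∧ lines.getLast? = some "..." ∧
    (keep.getD []).getD (lines.length - 1) false = true
instance (lines : List String) (keep : Option (List Bool)) (line_numbers : Bool) : Decidable (D_render_lines lines keep line_numbers) := by unfold D_render_lines; infer_instance

def Spec_render_lines (lines : List String) (keep : Option (List Bool)) (line_numbers : Bool) (out : List String) : Prop := ¬ D_render_lines lines keep line_numbers → out = render_lines_alt lines keep line_numbers
instance (lines : List String) (keep : Option (List Bool)) (line_numbers : Bool) (out : List String) : Decidable (Spec_render_lines lines keep line_numbers out) := by unfold Spec_render_lines; infer_instance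

def pvDiffWitness_render_lines : List String × Option (List Bool) × Bool := (["..."], some [true], false)
def pvDiffWitnessOut_render_lines : (List String) × (List String) := ([], ["..."])

-- ===== CLAIM =====
def Claim_unchanged_render_lines : Prop := ∀ (lines : List String) (keep : Option (List Bool)) (line_numbers : Bool), Dom_render_lines lines keep line_numbers → Pre_render_lines lines keep line_numbers → Spec_render_lines lines keep line_numbers (render_lines lines keep line_numbers)
def Claim_changed_render_lines : Prop := Dom_render_lines (pvDiffWitness_render_lines.1) (pvDiffWitness_render_lines.2.1) (pvDiffWitness_render_lines.2.2) ∧ Pre_render_lines (pvDiffWitness_render_lines.1) (pvDiffWitness_render_lines.2.1) (pvDiffWitness_render_lines.2.2) ∧ D_render_lines (pvDiffWitness_render_lines.1) (pvDiffWitness_render_lines.2.1) (pvDiffWitness_render_lines.2.2) ∧ render_lines (pvDiffWitness_render_lines.1) (pvDiffWitness_render_lines.2.1) (pvDiffWitness_render_lines.2.2) = pvDiffWitnessOut_render_lines.1 ∧ render_lines_alt (pvDiffWitness_render_lines.1) (pvDiffWitness_render_lines.2.1) (pvDiffWitness_render_lines.2.2) = pvDiffWitnessOut_render_lines.2 ∧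 pvDiffWitnessOut_render_lines.1 ≠ pvDiffWitnessOut_render_lines.2
def Claim_exact_render_lines : Prop := ∀ (lines : List String) (keep : Option (List Bool)) (line_numbers : Bool), Dom_render_lines lines keep line_numbers → Pre_render_lines lines keep line_numbers → D_render_lines lines keep line_numbers → render_lines lines keep line_numbers ≠ render_lines_alt lines keep line_numbers

-- ===== LEMMAS AND PROOFS =====

-- keep[i] as A reads it
def pvB (ks : List Bool) (i : Int) : Bool := (PySem.List.pyGet? ks i).getD false
-- kept indices from position i on
def pvKept (ks : List Bool) (n : Nat) (i : Int) : List Int :=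
  (PySem.List.pyRange i (n : Int) 1).filter (pvB ks)
-- the provisional trailing "..." A's loop leaves before the pop
def pvTrail (ks : List Bool) (n : Nat) (i : Nat) (lk : Bool) : List String :=
  if i < n ∧ pvB ks ((n : Int) - 1) = false ∧ (lk = true ∨ pvKept ks n i ≠ []) then ["..."] else []

theorem pvAccA (ks : List Bool) (ln : Bool) :
    ∀ (xs : List String) (idx : Int) (acc : List String) (lk : Bool),
      renderLoopA ks ln xs idx acc lk = acc ++ renderLoopA ks ln xs idx [] lk := by
  intro xs
  induction xs with
  | nil => intro idx acc lk; simp [renderLoopA]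
  | cons x rest ih =>
    intro idx acc lk
    cases hb : (PySem.List.pyGet? ks idx).getD false with
    | true =>
      simp only [renderLoopA, hb, if_true]
      rw [ih (idx + 1) (acc ++ [formatLine idx x ln]) true,
          ih (idx + 1) ([] ++ [formatLine idx x ln]) true]
      simp
    | false =>
      cases lk with
      | true =>
        simp only [renderLoopA, hb, Bool.false_eq_true, if_false, if_true]
        rw [ih (idx + 1) (acc ++ ["..."]) false, ih (idx + 1) ([] ++ ["..."]) false]
        simp
      | false =>
        simp only [renderLoopA, hb, Bool.false_eq_true, if_false]
        exact ih (idx + 1) acc false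

theorem pvAccB (lines : List String) (ln : Bool) :
    ∀ (js : List Int) (out : List String) (prev : Option Int),
      renderLoopB lines ln js out prev = out ++ renderLoopB lines ln js [] prev := by
  intro js
  induction js with
  | nil => intro out prev; simp [renderLoopB]
  | cons j rest ih =>
    intro out prev
    cases prev with
    | none =>
      simp only [renderLoopB]
      rw [ih (out ++ [formatLine j ((PySem.List.pyGet? lines j).getD "") ln]) (some j),
          ih ([] ++ [formatLine j ((PySem.List.pyGet? lines j).getD "") ln]) (some j)]
      simp
    | some p =>
      cases hb : decide (p + 1 < j) with
      | true =>
        have hlt : p + 1 < j := of_decide_eq_true hb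
        simp only [renderLoopB, if_pos hlt]
        rw [ih (out ++ ["..."] ++ [formatLine j ((PySem.List.pyGet? lines j).getD "") ln]) (some j),
            ih ([] ++ ["..."] ++ [formatLine j ((PySem.List.pyGet? lines j).getD "") ln]) (some j)]
        simp
      | false =>
        have hlt : ¬ p + 1 < j := of_decide_eq_false hb
        simp only [renderLoopB, if_neg hlt]
        rw [ih (out ++ [formatLine j ((PySem.List.pyGet? lines j).getD "") ln]) (some j),
            ih ([] ++ [formatLine j ((PySem.List.pyGet? lines j).getD "") ln]) (some j)]
        simp

theorem pvLastB (lines : List String) (ln : Bool) :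
    ∀ (js : List Int) (out : List String) (prev : Option Int),
      (renderLoopB lines ln js out prev).getLast? =
        match js.getLast? with
        | none => out.getLast?
        | some j => some (formatLine j ((PySem.List.pyGet? lines j).getD "") ln) := by
  intro js
  induction js with
  | nil => intro out prev; simp [renderLoopB]
  | cons j rest ih =>
    intro out prev
    simp only [renderLoopB]
    rw [ih]
    cases rest with
    | nil => simp
    | cons r rs =>
      simp only [List.getLast?_cons_cons]
      cases hg : (r :: rs).getLast? with
      | none => simp at hg
      | some a => simp

theorem pvMain (ks : List Bool) (ln : Bool) (lines : List String) (h : lines.length ≤ ks.length) :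
    ∀ (m i : Nat) (lk : Bool), i + m = lines.length →
      renderLoopA ks ln (lines.drop i) (i : Int) [] lk
        = renderLoopB lines ln (pvKept ks lines.length (i : Int)) []
            (if lk then some ((i : Int) - 1) else none)
          ++ pvTrail ks lines.length i lk := by
  intro m
  induction m with
  | zero =>
    intro i lk hi
    have hin : i = lines.length := by omega
    subst hin
    have h2 : pvKept ks lines.length (lines.length : Int) = [] := by
      unfold pvKept
      rw [PySem.List.pyRange_one_eq_nil le_rfl]
      rfl
    have h3 : pvTrail ks lines.length lines.length lk = [] := by
      unfold pvTrail
      rw [if_neg]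
      intro hc
      omega
    rw [List.drop_length, h2, h3]
    cases lk <;> simp [renderLoopA, renderLoopB]
  | succ m ih =>
    intro i lk hi
    have hilt : i < lines.length := by omega
    have hiltk : i < ks.length := by omega
    have hdrop : lines.drop i = lines[i] :: lines.drop (i + 1) := List.drop_eq_getElem_cons hilt
    have hcast : ((i : Int) + 1) = ((i + 1 : Nat) : Int) := by push_cast; ring
    have hlinesget : PySem.List.pyGet? lines (i : Int) = some lines[i] := PySem.List.pyGet?_ofNat lines i hilt
    have hksget : PySem.List.pyGet? ks (i : Int) = some (ks[i]'hiltk) := PySem.List.pyGet?_ofNat ks i hiltk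
    have hiltI : (i : Int) < (lines.length : Int) := by exact_mod_cast hilt
    have hconsK : PySem.List.pyRange (i : Int) (lines.length : Int) 1
        = (i : Int) :: PySem.List.pyRange ((i : Int) + 1) (lines.length : Int) 1 :=
      PySem.List.pyRange_one_cons hiltI
    have hKb : pvKept ks lines.length ((i : Int) + 1) ≠ [] → i + 1 < lines.length := by
      intro hne
      obtain ⟨j, hj⟩ := List.exists_mem_of_ne_nil _ hne
      have hj1 := (List.mem_filter.mp hj).1
      have hj2 := (PySem.List.mem_pyRange_one).mp hj1
      omega
    rw [hdrop]
    cases hb : ks[i]'hiltk with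
    | true =>
      have hbB : pvB ks (i : Int) = true := by simp [pvB, hksget, hb]
      have hkeptc : pvKept ks lines.length (i : Int)
          = (i : Int) :: pvKept ks lines.length ((i : Int) + 1) := by
        unfold pvKept
        rw [hconsK, List.filter_cons_of_pos (by simpa using hbB)]
      have htr : pvTrail ks lines.length i lk = pvTrail ks lines.length (i + 1) true := by
        unfold pvTrail
        have hKne : pvKept ks lines.length (i : Int) ≠ [] := by rw [hkeptc]; simp
        by_cases hlast : pvB ks ((lines.length : Int) - 1) = false
        · by_cases hi1 : i + 1 < lines.length
          · rw [if_pos ⟨hilt, hlast, Or.inr hKne⟩, if_pos ⟨hi1, hlast, Or.inl rfl⟩]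
          · exfalso
            have hieq : i + 1 = lines.length := by omega
            have hc2 : ((lines.length : Int) - 1) = (i : Int) := by
              rw [← hieq]; push_cast; ring
            rw [hc2, hbB] at hlast
            exact absurd hlast (by simp)
        · rw [if_neg (fun hc => hlast hc.2.1), if_neg (fun hc => hlast hc.2.1)]
      simp only [renderLoopA, hksget, Option.getD_some, hb, if_true]
      rw [pvAccA]
      simp only [List.nil_append]
      rw [hcast, ih (i + 1) true (by omega)]
      rw [hkeptc, htr]
      -- reduce the RHS renderLoopB one step
      have hfmt : formatLine (i : Int) ((PySem.List.pyGet? lines (i : Int)).getD "") ln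
          = formatLine (i : Int) lines[i] ln := by rw [hlinesget]; rfl
      have hprev1 : ((i + 1 : Nat) : Int) - 1 = (i : Int) := by push_cast; ring
      cases lk with
      | false =>
        simp only [Bool.false_eq_true, if_false, if_true, renderLoopB]
        rw [pvAccB]
        simp only [List.nil_append, hfmt, hprev1, hcast]
        rw [pvAccB lines ln (pvKept ks lines.length ((i + 1 : Nat) : Int))
              [formatLine (i : Int) lines[i] ln] (some (i : Int))]
        simp
      | true =>
        simp only [if_true, renderLoopB]
        rw [if_neg (by omega : ¬ ((i : Int) - 1 + 1 < (i : Int)))]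
        rw [pvAccB]
        simp only [List.nil_append, hfmt, hprev1, hcast]
        rw [pvAccB lines ln (pvKept ks lines.length ((i + 1 : Nat) : Int))
              [formatLine (i : Int) lines[i] ln] (some (i : Int))]
        simp
    | false =>
      have hbB : pvB ks (i : Int) = false := by simp [pvB, hksget, hb]
      have hkeptc : pvKept ks lines.length (i : Int)
          = pvKept ks lines.length ((i : Int) + 1) := by
        unfold pvKept
        rw [hconsK, List.filter_cons_of_neg (by simp [hbB])]
      simp only [renderLoopA, hksget, Option.getD_some, hb, Bool.false_eq_true, if_false]
      cases lk with
      | false =>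
        simp only [Bool.false_eq_true, if_false]
        rw [hcast, ih (i + 1) false (by omega)]
        rw [hkeptc]
        have htr : pvTrail ks lines.length (i + 1) false = pvTrail ks lines.length i false := by
          unfold pvTrail
          rw [hkeptc]
          by_cases hK : pvKept ks lines.length ((i : Int) + 1) = []
          · rw [if_neg (by simp [hK]), if_neg (by simp [hK])]
          · have h1 := hKb hK
            by_cases hlast : pvB ks ((lines.length : Int) - 1) = false
            · rw [if_pos ⟨h1, hlast, Or.inr hK⟩, if_pos ⟨hilt, hlast, Or.inr hK⟩]
            · rw [if_neg (fun hc => hlast hc.2.1), if_neg (fun hc => hlast hc.2.1)]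
        rw [htr]
        simp [← hcast]
      | true =>
        simp only [if_true]
        rw [pvAccA]
        rw [hcast, ih (i + 1) false (by omega)]
        rw [hkeptc]
        cases hK : pvKept ks lines.length ((i : Int) + 1) with
        | nil =>
          rw [hcast] at hK
          rw [hK]
          have hlastf : pvB ks ((lines.length : Int) - 1) = false := by
            by_cases hi1 : i + 1 < lines.length
            · have hmem : ((lines.length : Int) - 1) ∈
                  PySem.List.pyRange (((i + 1 : Nat) : Int)) (lines.length : Int) 1 := by
                rw [PySem.List.mem_pyRange_one]
                constructor <;> [push_cast; skip] <;> omega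
              have := List.filter_eq_nil_iff.mp hK _ hmem
              simpa using this
            · have hieq : i + 1 = lines.length := by omega
              have hc2 : ((lines.length : Int) - 1) = (i : Int) := by
                rw [← hieq]; push_cast; ring
              rw [hc2]; exact hbB
          have hK' : pvKept ks lines.length ((i : Int) + 1) = [] := by rw [hcast]; exact hK
          have ht1 : pvTrail ks lines.length (i + 1) false = [] := by
            unfold pvTrail
            rw [if_neg (by simp [hK'])]
          have ht2 : pvTrail ks lines.length i true = ["..."] := by
            unfold pvTrail
            rw [if_pos ⟨hilt, hlastf, Or.inl rfl⟩]
          rw [ht1, ht2]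
          simp [renderLoopB]
        | cons j rest =>
          have hjmem : j ∈ pvKept ks lines.length ((i : Int) + 1) := by
            rw [hK]; exact List.mem_cons_self
          have hj1 := (List.mem_filter.mp hjmem).1
          have hj2 := (PySem.List.mem_pyRange_one).mp hj1
          have hKne : pvKept ks lines.length ((i : Int) + 1) ≠ [] := by rw [hK]; simp
          have htr : pvTrail ks lines.length (i + 1) false = pvTrail ks lines.length i true := by
            unfold pvTrail
            rw [hkeptc]
            by_cases hlast : pvB ks ((lines.length : Int) - 1) = false
            · rw [if_pos ⟨hKb hKne, hlast, Or.inr hKne⟩, if_pos ⟨hilt, hlast, Or.inl rfl⟩]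
            · rw [if_neg (fun hc => hlast hc.2.1), if_neg (fun hc => hlast hc.2.1)]
          rw [hcast] at hK
          rw [hK, htr]
          -- both sides: unfold the head step of renderLoopB
          have hij : (i : Int) - 1 + 1 < j := by omega
          simp only [Bool.false_eq_true, if_false, renderLoopB]
          rw [if_pos hij]
          rw [pvAccB lines ln rest ([] ++ [formatLine j ((PySem.List.pyGet? lines j).getD "") ln]) (some j),
              pvAccB lines ln rest ([] ++ ["..."] ++ [formatLine j ((PySem.List.pyGet? lines j).getD "") ln]) (some j)]
          simp
  

theorem pvFmtFalse (idx : Int) (line : String) : formatLine idx line false = line := rfl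

theorem pvFmtNe (idx : Int) (line : String) : formatLine idx line true ≠ "..." := by
  unfold formatLine
  intro h
  have h2 := congrArg String.toList h
  rw [show ("..." : String).toList = ['.', '.', '.'] from by decide] at h2
  simp at h2
  have h3 := congrArg List.length h2
  simp at h3
  omega

theorem pvKeptSplit (ks : List Bool) (n : Nat) (h0 : 0 < n) (hb : pvB ks ((n : Int) - 1) = true) :
    pvKept ks n 0 = (PySem.List.pyRange 0 ((n : Int) - 1) 1).filter (pvB ks) ++ [(n : Int) - 1] := by
  unfold pvKept
  rw [PySem.List.pyRange_one_append 0 ((n : Int) - 1) (n : Int) (by omega) (by omega)]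
  rw [List.filter_append]
  congr 1
  have hsing := PySem.List.pyRange_one_singleton ((n : Int) - 1)
  rw [show ((n : Int) - 1) + 1 = (n : Int) from by ring] at hsing
  rw [hsing]
  simp [hb]

theorem pvXGetLast (ks : List Bool) (lines : List String) (ln : Bool)
    (h0 : 0 < lines.length)
    (hb : pvB ks ((lines.length : Int) - 1) = true) :
    (renderLoopB lines ln (pvKept ks lines.length 0) [] none).getLast?
      = some (formatLine ((lines.length : Int) - 1) (lines[lines.length - 1]'(by omega)) ln) := by
  rw [pvKeptSplit ks lines.length h0 hb]
  have hlb := pvLastB lines ln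
      ((PySem.List.pyRange 0 ((lines.length : Int) - 1) 1).filter (pvB ks)
        ++ [(lines.length : Int) - 1]) [] none
  rw [List.getLast?_concat] at hlb
  rw [hlb]
  have hc : ((lines.length : Int) - 1) = ((lines.length - 1 : Nat) : Int) := by omega
  simp [hc, PySem.List.pyGet?_natCast,
    List.getElem?_eq_getElem (show lines.length - 1 < lines.length by omega)]

theorem pvKeptPos (ks : List Bool) (n : Nat) (h : pvKept ks n 0 ≠ []) : 0 < n := by
  obtain ⟨j, hj⟩ := List.exists_mem_of_ne_nil _ h
  have hj1 := (List.mem_filter.mp hj).1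
  have hj2 := (PySem.List.mem_pyRange_one).mp hj1
  omega

theorem pvASome (lines : List String) (ks : List Bool) (ln : Bool) :
    render_lines lines (some ks) ln
      = (if renderLoopA ks ln lines 0 [] false ≠ [] ∧
            (renderLoopA ks ln lines 0 [] false).getLast? = some "..."
         then (renderLoopA ks ln lines 0 [] false).dropLast
         else renderLoopA ks ln lines 0 [] false) := rfl

theorem pvAltSome (lines : List String) (ks : List Bool) (ln : Bool) :
    render_lines_alt lines (some ks) ln
      = renderLoopB lines ln (pvKept ks lines.length 0) [] none := rfl

theorem pvA0 (lines : List String) (ks : List Bool) (ln : Bool)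
    (hlen : lines.length ≤ ks.length) :
    renderLoopA ks ln lines 0 [] false
      = renderLoopB lines ln (pvKept ks lines.length 0) [] none
        ++ pvTrail ks lines.length 0 false := by
  have hA := pvMain ks ln lines hlen lines.length 0 false (by omega)
  simpa using hA

-- ===== VERDICT =====
theorem render_lines_spec : Claim_unchanged_render_lines := by
  unfold Claim_unchanged_render_lines
  intro lines keep ln hDom hPre hnD
  cases keep with
  | none => rfl
  | some ks =>
    have hlen : lines.length ≤ ks.length := by simpa [Pre_render_lines] using hPre
    rw [pvASome, pvAltSome, pvA0 lines ks ln hlen]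
    by_cases hK : pvKept ks lines.length 0 = []
    · have ht : pvTrail ks lines.length 0 false = [] := by
        unfold pvTrail
        rw [if_neg (by simp [hK])]
      rw [ht, hK]
      simp [renderLoopB]
    · have h0n : 0 < lines.length := pvKeptPos ks lines.length hK
      by_cases hlast : pvB ks ((lines.length : Int) - 1) = false
      · have ht : pvTrail ks lines.length 0 false = ["..."] := by
          unfold pvTrail
          rw [if_pos ⟨h0n, hlast, Or.inr (by simpa using hK)⟩]
        rw [ht]
        rw [if_pos ⟨by simp, List.getLast?_concat⟩]
        simp
      · have hbt : pvB ks ((lines.length : Int) - 1) = true := by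
          cases hx : pvB ks ((lines.length : Int) - 1) with
          | true => rfl
          | false => exact absurd hx hlast
        have ht : pvTrail ks lines.length 0 false = [] := by
          unfold pvTrail
          rw [if_neg (fun hc => hlast hc.2.1)]
        rw [ht, List.append_nil]
        have hXl := pvXGetLast ks lines ln h0n hbt
        have hne : (renderLoopB lines ln (pvKept ks lines.length 0) [] none).getLast?
            ≠ some "..." := by
          rw [hXl]
          cases ln with
          | true => intro h; exact pvFmtNe _ _ (Option.some_injective _ h)
          | false =>
            rw [pvFmtFalse]
            intro h
            have hl : lines[lines.length - 1]'(by omega) = "..." := Option.some_injective _ h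
            apply hnD
            refine ⟨by simp, rfl, ?_, ?_⟩
            · rw [List.getLast?_eq_getElem?, List.getElem?_eq_getElem (by omega), hl]
            · have hcast : ((lines.length : Int) - 1) = ((lines.length - 1 : Nat) : Int) := by omega
              rw [hcast] at hbt
              unfold pvB at hbt
              rw [PySem.List.pyGet?_natCast, List.getElem?_eq_getElem (by omega)] at hbt
              simp only [Option.getD_some] at hbt
              simp [List.getD_eq_getElem?_getD, List.getElem?_eq_getElem (show lines.length - 1 < ks.length by omega), hbt]
        rw [if_neg (fun hc => hne hc.2)]

theorem render_lines_changed : Claim_changed_render_lines := by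
  unfold Claim_changed_render_lines; decide

theorem render_lines_tight : Claim_exact_render_lines := by
  unfold Claim_exact_render_lines
  intro lines keep ln hDom hPre hD
  obtain ⟨hkn, hln, hlastline, hkd⟩ := hD
  cases keep with
  | none => exact absurd rfl hkn
  | some ks =>
    subst hln
    have hlen : lines.length ≤ ks.length := by simpa [Pre_render_lines] using hPre
    have hne : lines ≠ [] := by
      intro h; rw [h] at hlastline; simp at hlastline
    have h0n : 0 < lines.length := List.length_pos_iff.mpr hne
    have hbt : pvB ks ((lines.length : Int) - 1) = true := by
      have hkd' : ks.getD (lines.length - 1) false = true := by simpa using hkd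
      have hcast : ((lines.length : Int) - 1) = ((lines.length - 1 : Nat) : Int) := by omega
      unfold pvB
      rw [hcast, PySem.List.pyGet?_natCast,
          List.getElem?_eq_getElem (show lines.length - 1 < ks.length by omega)]
      simp only [Option.getD_some]
      rw [List.getD_eq_getElem?_getD, List.getElem?_eq_getElem (show lines.length - 1 < ks.length by omega)] at hkd'
      simpa using hkd'
    have ht : pvTrail ks lines.length 0 false = [] := by
      unfold pvTrail
      rw [if_neg (fun hc => by rw [hbt] at hc; exact absurd hc.2.1 (by simp))]
    have hlval : lines[lines.length - 1]'(by omega) = "..." := by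
      rw [List.getLast?_eq_getElem?, List.getElem?_eq_getElem (by omega)] at hlastline
      exact Option.some_injective _ hlastline
    have hXl := pvXGetLast ks lines false h0n hbt
    rw [pvFmtFalse, hlval] at hXl
    rw [pvASome, pvAltSome, pvA0 lines ks false hlen, ht, List.append_nil]
    set X := renderLoopB lines false (pvKept ks lines.length 0) [] none with hX
    have hXnil : X ≠ [] := by
      intro h; rw [h] at hXl; simp at hXl
    rw [if_pos ⟨hXnil, hXl⟩]
    intro hcontra
    have := congrArg List.length hcontra
    rw [List.length_dropLast] at this
    have : X.length = 0 := by omega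
    exact hXnil (List.length_eq_zero_iff.mp this)
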